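-- pv_equiv track=rewrite | github.com/tigers2020/AnimeSorter | src/gui/theme/engine/performance_monitor.py | _get_metric_unit
-- ===== SOURCE A (Python) =====
-- def _get_metric_unit(metric_name: str) -> str:
--     """메트릭의 단위를 반환합니다"""
--     try:
--         unit_mapping = {
--             "time": "ms",
--             "parse_time": "ms",
--             "compile_time": "ms",
--             "optimize_time": "ms",
--             "generation_time": "ms",
--             "total_time": "ms",
--             "memory": "bytes",
--             "memory_saved": "bytes",
--             "cache_hits": "count",
--             "cache_misses": "count",
--             "nodes_processed": "count",
--             "rules_executed": "count",
--             "styles_generated": "count",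
--             "conditions_evaluated": "count",
--         }
--
--         for key, unit in unit_mapping.items():
--             if key in metric_name.lower():
--                 return unit
--
--         return "count"
--
--     except Exception:
--         return "count"
-- ===== SOURCE B (Python) =====
-- def _get_metric_unit(metric_name: str) -> str:
--     """메트릭의 단위를 반환합니다"""
--     try:
--         name = metric_name.lower()
--         if "time" in name:
--             return "ms"
--         if "memory" in name:
--             return "bytes"
--         return "count"
--     except Exception:
--         return "count"
-- ===== Notes on version B (the rewrite author's own statement) =====
-- stated objective: simpler
-- what changed: Drops the 14-entry lookup dict and the loop: every *_time key contains 'time' and memory_saved contains 'memory', and all remaining keys map to the default 'count', so a three-way if-chain on 'time'/'memory' substrings gives the identical result.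
import Mathlib
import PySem

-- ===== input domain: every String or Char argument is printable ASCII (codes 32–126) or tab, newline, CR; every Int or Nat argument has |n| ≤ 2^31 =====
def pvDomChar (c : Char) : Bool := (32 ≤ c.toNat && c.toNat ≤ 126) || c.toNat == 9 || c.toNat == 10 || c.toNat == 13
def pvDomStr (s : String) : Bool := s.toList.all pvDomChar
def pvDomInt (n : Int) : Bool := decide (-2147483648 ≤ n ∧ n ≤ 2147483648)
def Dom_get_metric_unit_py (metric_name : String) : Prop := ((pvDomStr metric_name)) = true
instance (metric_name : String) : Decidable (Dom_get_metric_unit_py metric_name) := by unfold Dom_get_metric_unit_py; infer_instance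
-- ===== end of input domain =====

-- B replaces A's 14-entry lookup table and loop by a three-way if-chain ('time' / 'memory' / default),
-- which returns the same unit for every string; equivalence of the RETURN value is what is proved.

-- ===== PORT A =====
-- A's dict literal, in insertion order, as an association list.
def pvUnitMapping : List (String × String) :=
  [("time", "ms"), ("parse_time", "ms"), ("compile_time", "ms"), ("optimize_time", "ms"),
   ("generation_time", "ms"), ("total_time", "ms"), ("memory", "bytes"), ("memory_saved", "bytes"),
   ("cache_hits", "count"), ("cache_misses", "count"), ("nodes_processed", "count"),
   ("rules_executed", "count"), ("styles_generated", "count"), ("conditions_evaluated", "count")]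

-- A's for-loop over the dict items: first key contained in the lowered name wins, default "count".
def pvUnitLoop : List (String × String) → String → String
  | [], _ => "count"
  | (k, u) :: rest, name => if PySem.Str.isIn k name then u else pvUnitLoop rest name

def get_metric_unit_py (metric_name : String) : String :=
  pvUnitLoop pvUnitMapping (PySem.Str.lower metric_name)

-- ===== PORT B =====
def get_metric_unit_py_alt (metric_name : String) : String :=
  let name := PySem.Str.lower metric_name
  if PySem.Str.isIn "time" name then "ms"
  else if PySem.Str.isIn "memory" name then "bytes"
  else "count"

-- ===== PRECONDITION & SPEC =====
def Spec_get_metric_unit_py (metric_name : String) (out : String) : Prop := out = get_metric_unit_py_alt metric_name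
instance (metric_name : String) (out : String) : Decidable (Spec_get_metric_unit_py metric_name out) := by unfold Spec_get_metric_unit_py; infer_instance

-- ===== CLAIM (what is proved, stated in full; the proofs are below) =====
def Claim_equal_get_metric_unit_py : Prop := ∀ (metric_name : String), Dom_get_metric_unit_py metric_name → Spec_get_metric_unit_py metric_name (get_metric_unit_py metric_name)

-- ===== LEMMAS AND PROOFS =====
-- If a sub-key is absent from the lowered name, any key containing it is absent too.
theorem pv_isIn_false_of_infix (k big : List Char) (n : List Char)
    (h : PySem.Chars.isIn k n = false) (hinf : k <:+: big) :
    PySem.Chars.isIn big n = false := by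
  rw [PySem.Chars.isIn_eq_false_iff] at h ⊢
  exact fun hb => h (hinf.trans hb)

-- ===== VERDICT (by name: the statement is the Claim_ definition above) =====
theorem get_metric_unit_py_spec : Claim_equal_get_metric_unit_py := by
  intro metric_name _
  unfold Spec_get_metric_unit_py get_metric_unit_py get_metric_unit_py_alt pvUnitMapping pvUnitLoop
  by_cases ht : PySem.Chars.isIn ['t','i','m','e'] (PySem.Chars.lower metric_name.toList) = true
  · simp [ht]
  · rw [Bool.not_eq_true] at ht
    have h1 := pv_isIn_false_of_infix _ ['p','a','r','s','e','_','t','i','m','e'] _ ht (by decide)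
    have h2 := pv_isIn_false_of_infix _ ['c','o','m','p','i','l','e','_','t','i','m','e'] _ ht (by decide)
    have h3 := pv_isIn_false_of_infix _ ['o','p','t','i','m','i','z','e','_','t','i','m','e'] _ ht (by decide)
    have h4 := pv_isIn_false_of_infix _ ['g','e','n','e','r','a','t','i','o','n','_','t','i','m','e'] _ ht (by decide)
    have h5 := pv_isIn_false_of_infix _ ['t','o','t','a','l','_','t','i','m','e'] _ ht (by decide)
    by_cases hm : PySem.Chars.isIn ['m','e','m','o','r','y'] (PySem.Chars.lower metric_name.toList) = true
    · simp [pvUnitLoop, ht, h1, h2, h3, h4, h5, hm]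
    · rw [Bool.not_eq_true] at hm
      have h6 := pv_isIn_false_of_infix _ ['m','e','m','o','r','y','_','s','a','v','e','d'] _ hm (by decide)
      simp [pvUnitLoop, ht, h1, h2, h3, h4, h5, hm, h6]
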